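-- pv_equiv track=rewrite | github.com/bdburns6389/launchcode | country_codes.py | get_country_codes
-- ===== SOURCE A (Python) =====
-- def get_country_codes(prices):
--     lst = []
--     prices_list = prices.split(", ")
--     for items in prices_list:
--         k = items.split("$") #splits each list item by $
--         z = (k[0])  #gets first two letters in "k" list.
--         lst.append(z)
--     return ", ".join(lst)  #Can make work in string but not list
-- ===== SOURCE B (Python) =====
-- def get_country_codes(prices):
--     # Single left-to-right scan with a skip flag: copy characters until a '$',
--     # then skip until the next ", " separator (which is copied), and resume.
--     out = []
--     i = 0
--     n = len(prices)
--     skip = False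
--     while i < n:
--         if skip:
--             if prices[i] == ',' and i + 1 < n and prices[i + 1] == ' ':
--                 out.append(', ')
--                 i += 2
--                 skip = False
--             else:
--                 i += 1
--         else:
--             if prices[i] == '$':
--                 skip = True
--             else:
--                 out.append(prices[i])
--             i += 1
--     return ''.join(out)
-- ===== Notes on version B (the rewrite author's own statement) =====
-- stated objective: alternative
-- what changed: Replaced the split-on-separator / per-item split-on-dollar / join pipeline with a single character scan over the whole string that copies text, drops everything from a dollar sign to the next comma-space separator, and copies the separator itself, building no intermediate token lists.
import Mathlib
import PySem

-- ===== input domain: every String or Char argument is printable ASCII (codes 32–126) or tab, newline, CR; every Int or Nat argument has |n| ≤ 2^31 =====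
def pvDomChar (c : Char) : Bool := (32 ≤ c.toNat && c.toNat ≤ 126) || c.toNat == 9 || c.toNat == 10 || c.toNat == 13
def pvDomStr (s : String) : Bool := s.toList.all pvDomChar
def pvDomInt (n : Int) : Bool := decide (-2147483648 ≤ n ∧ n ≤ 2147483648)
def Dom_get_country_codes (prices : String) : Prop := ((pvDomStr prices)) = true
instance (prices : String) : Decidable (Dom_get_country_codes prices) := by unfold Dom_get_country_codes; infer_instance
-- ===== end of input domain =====

-- B replaces A's split(", ") / per-item split("$") / join pipeline by a single character scan
-- with a skip flag (a genuinely different one-pass algorithm; same asymptotic cost).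


-- ===== PORT A =====
def get_country_codes (prices : String) : String :=
  -- prices.split(", "): the separator is the nonempty literal ", ", so split? is always some
  let prices_list := (PySem.Str.split? prices ", ").getD []
  let lst := prices_list.foldl (fun lst items =>
    let k := (PySem.Str.split? items "$").getD []   -- items.split("$"), separator "$" nonempty
    let z := (PySem.List.pyGet? k 0).getD ""        -- k[0]; Python split always returns ≥ 1 piece
    lst ++ [z]) []
  PySem.Str.join ", " lst

-- ===== PORT B =====
-- the while loop of Source B as recursion over the characters: the Bool is Source B's skip flag
def pvScan : Bool → List Char → List Char
  | false, [] => []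
  | false, c :: rest => if c = '$' then pvScan true rest else c :: pvScan false rest
  | true, [] => []
  | true, ',' :: ' ' :: r2 => ',' :: ' ' :: pvScan false r2
  | true, _ :: rest => pvScan true rest

def get_country_codes_alt (prices : String) : String :=
  String.ofList (pvScan false prices.toList)

-- ===== PRECONDITION & SPEC =====
def Spec_get_country_codes (prices : String) (out : String) : Prop := out = get_country_codes_alt prices
instance (prices : String) (out : String) : Decidable (Spec_get_country_codes prices out) := by unfold Spec_get_country_codes; infer_instance

-- ===== CLAIM (what is proved, stated in full; the proofs are below) =====
def Claim_equal_get_country_codes : Prop := ∀ (prices : String), Dom_get_country_codes prices → Spec_get_country_codes prices (get_country_codes prices)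

-- ===== LEMMAS AND PROOFS =====

-- structural reference version of Python's str.split with a nonempty separator s0 :: srest
def pvRefSplit (s0 : Char) (srest : List Char) : List Char → List (List Char)
  | [] => [[]]
  | c :: rest =>
    if (s0 :: srest).isPrefixOf (c :: rest) then
      [] :: pvRefSplit s0 srest (rest.drop srest.length)
    else
      match pvRefSplit s0 srest rest with
      | [] => [[c]]
      | t :: ts => (c :: t) :: ts
termination_by l => l.length
decreasing_by
  · simp only [List.length_cons]
    have := List.length_drop (l := rest) (i := srest.length)
    omega
  · simp

def pvConsHead (xs : List Char) : List (List Char) → List (List Char)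
  | [] => []
  | t :: ts => (xs ++ t) :: ts

lemma pvRefSplit_ne_nil (s0 : Char) (srest : List Char) (l : List Char) :
    pvRefSplit s0 srest l ≠ [] := by
  induction l using pvRefSplit.induct s0 srest with
  | case1 => simp [pvRefSplit]
  | case2 c rest h ih => simp [pvRefSplit, h]
  | case3 c rest h heq => rw [pvRefSplit]; simp [h, heq]
  | case4 c rest h t ts heq ih => rw [pvRefSplit]; simp [h, heq]

lemma pvGo_eq (s0 : Char) (srest : List Char) :
    ∀ (fuel : Nat) (l cur : List Char) (accs : List (List Char)),
      l.length ≤ fuel →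
      PySem.Chars.splitOn.go (s0 :: srest) fuel l cur accs =
        accs.reverse ++ pvConsHead cur.reverse (pvRefSplit s0 srest l) := by
  intro fuel
  induction fuel with
  | zero =>
    intro l cur accs h
    have hl : l = [] := by cases l <;> simp_all
    subst hl
    simp [PySem.Chars.splitOn.go, pvRefSplit, pvConsHead]
  | succ f ih =>
    intro l cur accs h
    cases l with
    | nil => simp [PySem.Chars.splitOn.go, pvRefSplit, pvConsHead]
    | cons c rest =>
      rw [PySem.Chars.splitOn.go]
      by_cases hp : (s0 :: srest).isPrefixOf (c :: rest) = true
      · rw [if_pos hp]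
        have hlen : (List.drop (s0 :: srest).length (c :: rest)).length ≤ f := by
          simp at *; omega
        rw [ih _ _ _ hlen]
        have hdrop : List.drop (s0 :: srest).length (c :: rest) = rest.drop srest.length := by
          simp
        rw [hdrop, pvRefSplit, if_pos hp]
        cases hq : pvRefSplit s0 srest (rest.drop srest.length) with
        | nil => exact absurd hq (pvRefSplit_ne_nil _ _ _)
        | cons t ts => simp [pvConsHead]
      · rw [if_neg hp]
        rw [ih _ _ _ (by simp at h ⊢; omega)]
        rw [pvRefSplit, if_neg hp]
        cases hq : pvRefSplit s0 srest rest with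
        | nil => exact absurd hq (pvRefSplit_ne_nil _ _ _)
        | cons t ts => simp [pvConsHead]

lemma pvSplitOn_eq (s0 : Char) (srest : List Char) (l : List Char) :
    PySem.Chars.splitOn l (s0 :: srest) = pvRefSplit s0 srest l := by
  rw [PySem.Chars.splitOn, pvGo_eq s0 srest _ _ _ _ (by omega)]
  cases hq : pvRefSplit s0 srest l with
  | nil => exact absurd hq (pvRefSplit_ne_nil _ _ _)
  | cons t ts => simp [pvConsHead]

-- the part before the first '$' is the head of the split on '$'
lemma pvRefSplit_dollar (t : List Char) :
    ∃ ts, pvRefSplit '$' [] t = t.takeWhile (· ≠ '$') :: ts := by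
  induction t with
  | nil => exact ⟨[], by simp [pvRefSplit]⟩
  | cons c rest ih =>
    by_cases hc : c = '$'
    · subst hc
      refine ⟨pvRefSplit '$' [] rest, ?_⟩
      rw [pvRefSplit]
      simp [List.isPrefixOf, List.takeWhile]
    · obtain ⟨ts, hts⟩ := ih
      refine ⟨ts, ?_⟩
      rw [pvRefSplit]
      have hp : (['$']).isPrefixOf (c :: rest) = false := by
        simp [List.isPrefixOf]; intro h; exact absurd h.symm hc
      simp only [hp]
      simp [hts, List.takeWhile, hc]

def pvTW (t : List Char) : List Char := t.takeWhile (· ≠ '$')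

-- the value port A computes, over List Char …
def pvFA (cs : List Char) : List Char :=
  PySem.Chars.join [',', ' '] ((pvRefSplit ',' [' '] cs).map pvTW)

-- … and the same with the first token dropped (the state after a '$')
def pvGA (cs : List Char) : List Char :=
  PySem.Chars.join [',', ' '] ([] :: ((pvRefSplit ',' [' '] cs).tail.map pvTW))

lemma pvFA_nil : pvFA [] = [] := by
  simp [pvFA, pvRefSplit, pvTW, PySem.Chars.join, List.intercalate]

lemma pvGA_nil : pvGA [] = [] := by
  simp [pvGA, pvRefSplit, PySem.Chars.join, List.intercalate]

lemma pvSep_pre (r : List Char) : ([',', ' ']).isPrefixOf (',' :: ' ' :: r) = true := by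
  simp [List.isPrefixOf]

lemma pvRefSplit_sep (r : List Char) :
    pvRefSplit ',' [' '] (',' :: ' ' :: r) = [] :: pvRefSplit ',' [' '] r := by
  rw [pvRefSplit]
  simp [pvSep_pre]

lemma pvJoin_cons_ne (t : List Char) (ts : List (List Char)) (h : ts ≠ []) :
    PySem.Chars.join [',', ' '] (t :: ts) = t ++ ',' :: ' ' :: PySem.Chars.join [',', ' '] ts := by
  cases ts with
  | nil => exact absurd rfl h
  | cons q qs => rw [PySem.Chars.join_cons_cons]; simp

lemma pvFA_sep (r : List Char) : pvFA (',' :: ' ' :: r) = ',' :: ' ' :: pvFA r := by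
  rw [pvFA, pvRefSplit_sep]
  cases hq : pvRefSplit ',' [' '] r with
  | nil => exact absurd hq (pvRefSplit_ne_nil _ _ _)
  | cons t ts =>
    rw [List.map_cons, pvJoin_cons_ne _ _ (by simp)]
    simp [pvFA, pvTW, hq]

lemma pvGA_sep (r : List Char) : pvGA (',' :: ' ' :: r) = ',' :: ' ' :: pvFA r := by
  rw [pvGA, pvRefSplit_sep]
  cases hq : pvRefSplit ',' [' '] r with
  | nil => exact absurd hq (pvRefSplit_ne_nil _ _ _)
  | cons t ts =>
    rw [List.tail_cons, List.map_cons, pvJoin_cons_ne _ _ (by simp)]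
    simp [pvFA, pvTW, hq]

lemma pvRefSplit_nonpre (c : Char) (r : List Char)
    (h : ([',', ' ']).isPrefixOf (c :: r) ≠ true) :
    pvRefSplit ',' [' '] (c :: r) = pvConsHead [c] (pvRefSplit ',' [' '] r) := by
  rw [pvRefSplit]
  simp only [h, if_false, Bool.false_eq_true]
  cases hq : pvRefSplit ',' [' '] r with
  | nil => exact absurd hq (pvRefSplit_ne_nil _ _ _)
  | cons t ts => simp [pvConsHead]

lemma pvFA_dollar (r : List Char) : pvFA ('$' :: r) = pvGA r := by
  rw [pvFA, pvRefSplit_nonpre _ _ (by simp [List.isPrefixOf])]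
  rw [pvGA]
  cases hq : pvRefSplit ',' [' '] r with
  | nil => exact absurd hq (pvRefSplit_ne_nil _ _ _)
  | cons t ts => simp [pvConsHead, pvTW, List.takeWhile]

lemma pvFA_cons_nonpre (c : Char) (r : List Char) (hc : c ≠ '$')
    (h : ([',', ' ']).isPrefixOf (c :: r) ≠ true) : pvFA (c :: r) = c :: pvFA r := by
  rw [pvFA, pvRefSplit_nonpre _ _ h, pvFA]
  cases hq : pvRefSplit ',' [' '] r with
  | nil => exact absurd hq (pvRefSplit_ne_nil _ _ _)
  | cons t ts =>
    simp only [pvConsHead, List.map_cons]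
    have htw : pvTW ([c] ++ t) = c :: pvTW t := by simp [pvTW, hc]
    rw [htw]
    cases ts with
    | nil => simp [PySem.Chars.join_singleton]
    | cons q qs => rw [List.map_cons, PySem.Chars.join_cons_cons, PySem.Chars.join_cons_cons]; simp

lemma pvFA_cons (c : Char) (r : List Char) (hc : c ≠ '$') : pvFA (c :: r) = c :: pvFA r := by
  by_cases h : ([',', ' ']).isPrefixOf (c :: r) = true
  · have : c = ',' ∧ ∃ r2, r = ' ' :: r2 := by
      cases r with
      | nil => simp [List.isPrefixOf] at h
      | cons d r2 =>
        simp [List.isPrefixOf] at h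
        exact ⟨h.1.symm, r2, by rw [← h.2]⟩
    obtain ⟨hc', r2, hr⟩ := this
    subst hc'; subst hr
    rw [pvFA_sep, pvFA_cons_nonpre ' ' r2 (by decide) (by simp [List.isPrefixOf])]
  · exact pvFA_cons_nonpre c r hc h

lemma pvGA_cons (c : Char) (r : List Char)
    (h : ([',', ' ']).isPrefixOf (c :: r) ≠ true) : pvGA (c :: r) = pvGA r := by
  rw [pvGA, pvGA, pvRefSplit_nonpre _ _ h]
  cases hq : pvRefSplit ',' [' '] r with
  | nil => exact absurd hq (pvRefSplit_ne_nil _ _ _)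
  | cons t ts => simp [pvConsHead]

lemma pvScan_eq (b : Bool) (cs : List Char) :
    pvScan b cs = if b then pvGA cs else pvFA cs := by
  induction b, cs using pvScan.induct
  case case1 => simp [pvScan, pvFA_nil]
  case case2 rest ih => simp only [pvScan, if_true]; simp at ih; rw [ih, pvFA_dollar]; simp
  case case3 c rest h ih =>
    simp only [pvScan, if_neg h]
    simp at ih; rw [ih, pvFA_cons c rest h]; simp
  case case4 => simp [pvScan, pvGA_nil]
  case case5 r2 ih => simp only [pvScan]; simp at ih; rw [ih, pvGA_sep]; simp
  case case6 c rest hx ih =>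
    have hpre : ([',', ' ']).isPrefixOf (c :: rest) ≠ true := by
      intro h
      cases rest with
      | nil => simp [List.isPrefixOf] at h
      | cons d r2 =>
        simp [List.isPrefixOf] at h
        exact hx r2 h.1.symm (by rw [← h.2])
    simp only [pvScan]
    simp at ih; rw [ih, pvGA_cons c rest hpre]; simp

lemma pvFoldl_append (f : String → String) (xs : List String) :
    ∀ acc : List String, xs.foldl (fun l i => l ++ [f i]) acc = acc ++ xs.map f := by
  induction xs with
  | nil => intro acc; simp
  | cons x xs ih => intro acc; simp [ih]

lemma pvMain (prices : String) : get_country_codes prices = get_country_codes_alt prices := by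
  have hsep : (", " : String).toList = [',', ' '] := rfl
  have hdol : ("$" : String).toList = ['$'] := rfl
  have hsplit : (PySem.Str.split? prices ", ").getD [] =
      (pvRefSplit ',' [' '] prices.toList).map String.ofList := by
    rw [PySem.Str.split?, PySem.Chars.split?, hsep]
    simp [pvSplitOn_eq]
  have hf : ∀ t : List Char,
      (PySem.List.pyGet? ((PySem.Str.split? (String.ofList t) "$").getD []) 0).getD "" =
        String.ofList (pvTW t) := by
    intro t
    obtain ⟨ts, hts⟩ := pvRefSplit_dollar t
    rw [PySem.Str.split?, PySem.Chars.split?, hdol]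
    simp only [List.isEmpty_cons, Option.getD_some, String.toList_ofList]
    rw [pvSplitOn_eq, hts]
    simp [PySem.List.pyGet?, PySem.List.pyIdx?, pvTW]
  rw [get_country_codes, get_country_codes_alt]
  simp only [hsplit, pvFoldl_append, List.nil_append, List.map_map]
  have hmap : ∀ t : List Char,
      ((fun items => (PySem.List.pyGet? ((PySem.Str.split? items "$").getD []) 0).getD "") ∘
        String.ofList) t = String.ofList (pvTW t) := fun t => hf t
  rw [List.map_congr_left (fun t _ => hmap t)]
  rw [PySem.Str.join, hsep]
  rw [pvScan_eq, if_neg (by simp), pvFA]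
  congr 1
  rw [List.map_map]
  exact congrArg _ (List.map_congr_left (fun t _ => by simp [pvTW]))

-- ===== VERDICT (by name: the statement is the Claim_ definition above) =====
theorem get_country_codes_spec : Claim_equal_get_country_codes := by
  intro prices _
  unfold Spec_get_country_codes
  exact pvMain prices
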